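-- pv_equiv track=rewrite | github.com/MateuszM02/University | AI/p1/zadanie3.py | FiveInARow
-- ===== SOURCE A (Python) =====
-- def FiveInARow(hand, blot): # sprawdza, czy 5 kart jest kolejnych (tylko Blotkarz)
--     if(not blot):
--         return False
--     indexes = []
--     for i in range(5):
--         indexes.append(int(hand[i][0]))
--     indexes.sort()
--     straight = True
--     for i in range(1, 5):
--         straight = straight and (indexes[i] - indexes[i-1] == 1)
--     return straight
-- ===== SOURCE B (Python) =====
-- def FiveInARow(hand, blot):
--     if not blot:
--         return False
--     ranks = [int(hand[i][0]) for i in range(5)]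
--     return max(ranks) - min(ranks) == 4 and len(set(ranks)) == 5
-- ===== Notes on version B (the rewrite author's own statement) =====
-- stated objective: simpler
-- what changed: Replaces the sort followed by an adjacent-difference scan with a min/max span test plus set-distinctness (five distinct ranks spanning exactly 4 are necessarily consecutive), dropping the sort and the index loop.
import Mathlib
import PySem

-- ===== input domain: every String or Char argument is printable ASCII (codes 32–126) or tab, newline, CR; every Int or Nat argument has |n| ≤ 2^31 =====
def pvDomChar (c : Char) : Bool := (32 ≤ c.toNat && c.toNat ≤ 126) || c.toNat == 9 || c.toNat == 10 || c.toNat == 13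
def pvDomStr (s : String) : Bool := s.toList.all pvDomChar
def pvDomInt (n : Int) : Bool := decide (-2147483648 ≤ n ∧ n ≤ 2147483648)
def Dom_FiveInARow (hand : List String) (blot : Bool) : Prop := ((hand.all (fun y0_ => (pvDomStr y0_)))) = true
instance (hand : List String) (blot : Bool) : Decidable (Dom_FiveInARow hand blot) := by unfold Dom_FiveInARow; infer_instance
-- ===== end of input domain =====

-- B replaces A's sort + adjacent-difference scan by a min/max span test plus set-distinctness
-- (five distinct ranks spanning exactly 4 are necessarily consecutive); objective: simpler.

-- int(hand[i][0]): index into hand, take character 0, parse it as an int (total form; Pre_ excludes the raising inputs)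
def pvRank (hand : List String) (i : Int) : Int :=
  ((PySem.Str.pyGet? (PySem.List.pyGetD hand i "") 0).bind (fun c => PySem.Int.ofChars? [c])).getD 0

-- ===== PORT A =====
def FiveInARow (hand : List String) (blot : Bool) : Bool :=
  if !blot then false
  else
    let indexes : List Int := (PySem.List.pyRange 0 5 1).foldl (fun acc i => acc ++ [pvRank hand i]) []
    let sorted := PySem.List.sorted indexes (fun x => x) false
    (PySem.List.pyRange 1 5 1).foldl
      (fun straight i => straight &&
        decide (PySem.List.pyGetD sorted i 0 - PySem.List.pyGetD sorted (i - 1) 0 = 1)) true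

-- ===== PORT B =====
def FiveInARow_alt (hand : List String) (blot : Bool) : Bool :=
  if !blot then false
  else
    let ranks : List Int := (PySem.List.pyRange 0 5 1).map (fun i => pvRank hand i)
    decide ((PySem.List.max? ranks (fun x => x)).getD 0
      - (PySem.List.min? ranks (fun x => x)).getD 0 = 4)
    && decide ((PySem.Set.ofList ranks).length = 5)

-- ===== PRECONDITION & SPEC =====
-- Pre_ excludes exactly the inputs where the Python raises: with blot truthy it reads hand[0..4][0]
-- (IndexError on a short hand or an empty string) and int() of that single character (ValueError
-- unless it is a decimal digit — exact for the ASCII domain).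
def Pre_FiveInARow (hand : List String) (blot : Bool) : Prop :=
  blot = true → 5 ≤ hand.length ∧
    ∀ s ∈ hand.take 5, s.toList ≠ [] ∧ (s.toList.headD ' ').isDigit = true
instance (hand : List String) (blot : Bool) : Decidable (Pre_FiveInARow hand blot) := by
  unfold Pre_FiveInARow; infer_instance

def pvWitness_FiveInARow : List String × Bool := (["1a", "2b", "3c", "4d", "5e"], true)

def Spec_FiveInARow (hand : List String) (blot : Bool) (out : Bool) : Prop := out = FiveInARow_alt hand blot
instance (hand : List String) (blot : Bool) (out : Bool) : Decidable (Spec_FiveInARow hand blot out) := by unfold Spec_FiveInARow; infer_instance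

-- ===== CLAIM (what is proved, stated in full; the proofs are below) =====
def Claim_equal_FiveInARow : Prop := ∀ (hand : List String) (blot : Bool), Dom_FiveInARow hand blot → Pre_FiveInARow hand blot → Spec_FiveInARow hand blot (FiveInARow hand blot)

-- ===== LEMMAS AND PROOFS =====

-- set(xs) (first occurrences in order) is a sublist of xs
lemma ofList_sublist {α : Type} [BEq α] [LawfulBEq α] (xs : List α) :
    (PySem.Set.ofList xs).Sublist xs := by
  induction xs with
  | nil => simp [PySem.Set.ofList]
  | cons x t ih =>
    rw [PySem.Set.ofList_cons, PySem.Set.discard]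
    exact List.Sublist.cons₂ x (List.filter_sublist.trans ih)

-- len(set(xs)) == len(xs) exactly when xs has no duplicates
lemma length_ofList_eq_iff (xs : List Int) :
    (PySem.Set.ofList xs).length = xs.length ↔ xs.Nodup := by
  constructor
  · intro h
    have := (ofList_sublist xs).eq_of_length h
    rw [← this]; exact PySem.Set.nodup_ofList xs
  · intro h; rw [PySem.Set.ofList_eq_self_of_nodup _ h]

-- the heart of the equivalence, over five arbitrary integers:
-- A's adjacent-difference scan of the sorted list equals B's span-and-distinctness test
lemma straight_key (a b c d e : Int) :
    ((PySem.List.pyRange 1 5 1).foldl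
      (fun st i => st && decide (PySem.List.pyGetD (PySem.List.sorted [a,b,c,d,e] (fun x => x) false) i 0
        - PySem.List.pyGetD (PySem.List.sorted [a,b,c,d,e] (fun x => x) false) (i - 1) 0 = 1)) true)
    = (decide ((PySem.List.max? [a,b,c,d,e] (fun x => x)).getD 0
        - (PySem.List.min? [a,b,c,d,e] (fun x => x)).getD 0 = 4)
       && decide ((PySem.Set.ofList [a,b,c,d,e]).length = 5)) := by
  have hperm := PySem.List.sorted_perm [a,b,c,d,e] (fun x : Int => x) false
  have hpw := PySem.List.sorted_pairwise [a,b,c,d,e] (fun x : Int => x)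
  have hlen : (PySem.List.sorted [a,b,c,d,e] (fun x : Int => x) false).length = 5 := by
    rw [PySem.List.length_sorted]; rfl
  rcases hq : PySem.List.sorted [a,b,c,d,e] (fun x : Int => x) false with
    _|⟨x0,_|⟨x1,_|⟨x2,_|⟨x3,_|⟨x4,_|⟨x5,t⟩⟩⟩⟩⟩⟩ <;> rw [hq] at hlen <;> simp at hlen
  rw [hq] at hperm hpw
  have hr : PySem.List.pyRange 1 5 1 = [1,2,3,4] := by decide
  rw [hr]
  simp only [List.pairwise_cons, List.mem_cons] at hpw
  rcases hM : PySem.List.max? [a,b,c,d,e] (fun x : Int => x) with _ | M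
  · rw [PySem.List.max?_eq_none_iff] at hM; simp at hM
  rcases hm : PySem.List.min? [a,b,c,d,e] (fun x : Int => x) with _ | m
  · rw [PySem.List.min?_eq_none_iff] at hm; simp at hm
  have hMmem : M ∈ [x0,x1,x2,x3,x4] := hperm.mem_iff.mpr (PySem.List.max?_mem hM)
  have hMmax : ∀ y ∈ [x0,x1,x2,x3,x4], y ≤ M := fun y hy => PySem.List.max?_isMax hM y (hperm.mem_iff.mp hy)
  have hmmem : m ∈ [x0,x1,x2,x3,x4] := hperm.mem_iff.mpr (PySem.List.min?_mem hm)
  have hmmin : ∀ y ∈ [x0,x1,x2,x3,x4], m ≤ y := fun y hy => PySem.List.min?_isMin hm y (hperm.mem_iff.mp hy)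
  have hnd : decide ((PySem.Set.ofList [a,b,c,d,e]).length = 5) = decide ([x0,x1,x2,x3,x4].Nodup) := by
    apply decide_eq_decide.mpr
    rw [show (5:Nat) = ([a,b,c,d,e] : List Int).length from rfl, length_ofList_eq_iff]
    exact (hperm.nodup_iff).symm
  obtain ⟨h01, h02, h12, h23, h34⟩ :
      x0 ≤ x1 ∧ x0 ≤ x4 ∧ x1 ≤ x2 ∧ x2 ≤ x3 ∧ x3 ≤ x4 := by
    refine ⟨?_, ?_, ?_, ?_, ?_⟩ <;> first
      | exact hpw.1 x1 (by simp) | exact hpw.1 x4 (by simp)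
      | exact hpw.2.1 x2 (by simp) | exact hpw.2.2.1 x3 (by simp)
      | exact hpw.2.2.2.1 x4 (by simp)
  have hMx : M = x4 := by
    have h1 : x4 ≤ M := hMmax x4 (by simp)
    have h2 : M ≤ x4 := by
      simp only [List.mem_cons, List.not_mem_nil, or_false] at hMmem
      rcases hMmem with h|h|h|h|h <;> omega
    omega
  have hmx : m = x0 := by
    have h1 : m ≤ x0 := hmmin x0 (by simp)
    have h2 : x0 ≤ m := by
      simp only [List.mem_cons, List.not_mem_nil, or_false] at hmmem
      rcases hmmem with h|h|h|h|h <;> omega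
    omega
  rw [hnd, hMx, hmx]
  simp only [List.foldl, pysem, Option.getD_some]
  rw [Bool.eq_iff_iff]
  simp only [Bool.and_eq_true, decide_eq_true_eq, List.nodup_cons, List.mem_cons,
    List.not_mem_nil, or_false, not_or, List.nodup_nil, and_true, true_and]
  norm_num [PySem.List.pyGetD, PySem.List.pyGet?, PySem.List.pyIdx?, List.getD,
    show ((2:Int).toNat = 2) from rfl, show ((3:Int).toNat = 3) from rfl, show ((4:Int).toNat = 4) from rfl]
  omega

-- ===== VERDICT (by name: the statement is the Claim_ definition above) =====
theorem FiveInARow_spec : Claim_equal_FiveInARow := by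
  intro hand blot _ _
  unfold Spec_FiveInARow FiveInARow FiveInARow_alt
  cases blot
  · rfl
  · have h05 : PySem.List.pyRange 0 5 1 = [0,1,2,3,4] := by decide
    simp only [Bool.not_true, Bool.false_eq_true, if_false, h05, List.foldl, List.map,
      List.nil_append, List.cons_append]
    exact straight_key _ _ _ _ _
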